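-- pv_equiv track=rewrite | github.com/rhabimendoza/Python-And-Ladder | syntax_file.py | separateTokens
-- ===== SOURCE A (Python) =====
-- def separateTokens(lines):
--
--     # create storage variables
--     tokens_line = []
--     current_line = []
--
--     # separate by line count and ignore comment
--     for _, token in lines:
--         if token != "line_counter" and token != "comment":
--             current_line.append(token)
--         elif token == "line_counter":
--             if current_line:
--                 tokens_line.append(current_line)
--                 current_line = []
--             else:
--                 tokens_line.append([])
--     if current_line:
--         tokens_line.append(current_line)
--
--     # return the tokens
--     return tokens_line
-- ===== SOURCE B (Python) =====
-- def separateTokens(lines):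
--     # recursive split: drop comments, then split the flat token stream on
--     # "line_counter" delimiters, finally drop a trailing empty group
--     def split(seq):
--         if "line_counter" not in seq:
--             return [seq]
--         i = seq.index("line_counter")
--         return [seq[:i]] + split(seq[i + 1:])
--     seq = [t for _, t in lines if t != "comment"]
--     groups = split(seq)
--     return groups if groups[-1] else groups[:-1]
-- ===== Notes on version B (the rewrite author's own statement) =====
-- stated objective: alternative
-- what changed: Replaced A's stateful emit-on-delimiter accumulator loop with a two-phase approach: filter out comments into a flat token stream, then recursively split it at each line_counter via index-and-slice, dropping a trailing empty group.
import Mathlib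
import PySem

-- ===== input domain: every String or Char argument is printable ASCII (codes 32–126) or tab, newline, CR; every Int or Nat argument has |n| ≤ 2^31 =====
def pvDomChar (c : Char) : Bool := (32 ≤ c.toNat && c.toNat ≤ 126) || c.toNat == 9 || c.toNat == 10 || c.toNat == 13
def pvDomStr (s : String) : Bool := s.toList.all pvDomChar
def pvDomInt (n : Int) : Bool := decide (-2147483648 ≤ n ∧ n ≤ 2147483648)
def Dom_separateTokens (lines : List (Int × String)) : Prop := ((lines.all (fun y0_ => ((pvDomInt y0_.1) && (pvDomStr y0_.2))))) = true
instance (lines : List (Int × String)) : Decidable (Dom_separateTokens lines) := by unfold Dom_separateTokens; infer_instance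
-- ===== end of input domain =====

-- B replaces A's stateful emit-on-delimiter accumulator by a comment filter followed by a
-- recursive index-and-slice split on "line_counter", dropping a trailing empty group (objective: alternative).

-- ===== PORT A =====
-- the loop body of A's for-loop, on state (tokens_line, current_line)
def pvStepA (st : List (List String) × List String) (token : String) :
    List (List String) × List String :=
  if token ≠ "line_counter" ∧ token ≠ "comment" then (st.1, st.2 ++ [token])
  else if token = "line_counter" then
    if st.2 ≠ [] then (st.1 ++ [st.2], []) else (st.1 ++ [[]], [])
  else st

def separateTokens (lines : List (Int × String)) : List (List String) :=
  let st := lines.foldl (fun st p => pvStepA st p.2) ([], [])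
  if st.2 ≠ [] then st.1 ++ [st.2] else st.1

-- ===== PORT B =====
-- Source B's `split`: Python's `"line_counter" not in seq` / `seq.index(...)` pair is exactly a
-- match on PySem.List.index?; seq[:i] = take i, seq[i+1:] = drop (i+1) (nonnegative slices)
def pvSplitLC (seq : List String) : List (List String) :=
  match h : PySem.List.index? seq "line_counter" with
  | none => [seq]
  | some i => seq.take i :: pvSplitLC (seq.drop (i + 1))
termination_by seq.length
decreasing_by
  rw [PySem.List.index?_eq_some_iff] at h
  obtain ⟨pre, suf, rfl, rfl, -⟩ := h
  simp
  omega

def separateTokens_alt (lines : List (Int × String)) : List (List String) :=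
  let seq := (lines.filter (fun p => p.2 ≠ "comment")).map Prod.snd
  let groups := pvSplitLC seq
  -- `groups` is never empty, so Python's `groups[-1]` never raises
  if PySem.List.pyGet? groups (-1) ≠ some [] then groups
  else PySem.List.slice groups none (some (-1))

-- ===== PRECONDITION & SPEC =====
def Spec_separateTokens (lines : List (Int × String)) (out : List (List String)) : Prop := out = separateTokens_alt lines
instance (lines : List (Int × String)) (out : List (List String)) : Decidable (Spec_separateTokens lines out) := by unfold Spec_separateTokens; infer_instance

-- ===== CLAIM (what is proved, stated in full; the proofs are below) =====
def Claim_equal_separateTokens : Prop := ∀ (lines : List (Int × String)), Dom_separateTokens lines → Spec_separateTokens lines (separateTokens lines)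

-- ===== LEMMAS AND PROOFS =====

-- keep all groups but a trailing empty one (proof-side characterisation of B's last step)
def pvTrim : List (List String) → List (List String)
  | [] => []
  | [g] => if g = [] then [] else [g]
  | g :: g' :: gs => g :: pvTrim (g' :: gs)

-- prepend pending tokens to the first group
def pvConsPre (cur : List String) : List (List String) → List (List String)
  | [] => [cur]
  | g :: gs => (cur ++ g) :: gs

lemma pvSplitLC_ne_nil (seq : List String) : pvSplitLC seq ≠ [] := by
  unfold pvSplitLC
  split <;> simp

lemma pvSplitLC_nil : pvSplitLC [] = [[]] := by
  unfold pvSplitLC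
  split
  · rfl
  · rename_i i h
    rw [PySem.List.index?_eq_some_iff] at h
    obtain ⟨pre, suf, h, -, -⟩ := h
    simp at h

lemma pvSplitLC_cons_lc (rest : List String) :
    pvSplitLC ("line_counter" :: rest) = [] :: pvSplitLC rest := by
  conv_lhs => unfold pvSplitLC
  split
  · rename_i h
    rw [PySem.List.index?_eq_none_iff] at h
    simp at h
  · rename_i i h
    rw [PySem.List.index?_cons_self] at h
    cases h
    simp

lemma pvSplitLC_cons_ne (t : String) (rest : List String) (ht : t ≠ "line_counter") :
    pvSplitLC (t :: rest) = pvConsPre [t] (pvSplitLC rest) := by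
  conv_lhs => unfold pvSplitLC
  split
  · rename_i h
    rw [PySem.List.index?_eq_none_iff] at h
    simp at h
    conv_rhs => unfold pvSplitLC
    split
    · rfl
    · rename_i i h'
      rw [PySem.List.index?_eq_some_iff] at h'
      obtain ⟨pre, suf, h', -, -⟩ := h'
      exact absurd (h' ▸ (by simp : "line_counter" ∈ pre ++ "line_counter" :: suf)) h.2
  · rename_i i h
    rw [PySem.List.index?_cons_of_ne] at h
    case h_2.h => exact ht
    cases hr : PySem.List.index? rest "line_counter" with
    | none => rw [hr] at h; simp at h
    | some j =>
      rw [hr] at h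
      simp at h
      subst h
      conv_rhs => unfold pvSplitLC
      rw [hr]
      simp [pvConsPre, List.take_succ_cons, List.drop_succ_cons]

lemma pvConsPre_nil_eq (gs : List (List String)) (h : gs ≠ []) : pvConsPre [] gs = gs := by
  cases gs with
  | nil => exact absurd rfl h
  | cons g gs => simp [pvConsPre]

lemma pvConsPre_consPre (cur t : List String) (gs : List (List String)) :
    pvConsPre cur (pvConsPre t gs) = pvConsPre (cur ++ t) gs := by
  cases gs <;> simp [pvConsPre]

lemma pvTrim_cons (g : List String) (gs : List (List String)) (h : gs ≠ []) :
    pvTrim (g :: gs) = g :: pvTrim gs := by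
  cases gs with
  | nil => exact absurd rfl h
  | cons g' gs => rfl

-- the loop invariant: finalized A-state = acc ++ trimmed split of the remaining token stream
lemma pv_loop (ps : List (Int × String)) :
    ∀ (acc : List (List String)) (cur : List String),
    (let st := ps.foldl (fun st p => pvStepA st p.2) (acc, cur)
     if st.2 ≠ [] then st.1 ++ [st.2] else st.1)
    = acc ++ pvTrim (pvConsPre cur (pvSplitLC ((ps.filter (fun p => p.2 ≠ "comment")).map Prod.snd))) := by
  induction ps with
  | nil =>
    intro acc cur
    simp only [List.foldl_nil, List.filter_nil, List.map_nil, pvSplitLC_nil, pvConsPre, pvTrim]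
    by_cases h : cur = [] <;> simp [h]
  | cons p ps ih =>
    intro acc cur
    by_cases hc : p.2 = "comment"
    · have : pvStepA (acc, cur) p.2 = (acc, cur) := by
        simp [pvStepA, hc]
      simp only [List.foldl_cons, List.filter_cons, hc]
      simpa [hc] using ih acc cur
    · by_cases hl : p.2 = "line_counter"
      · have : pvStepA (acc, cur) p.2 = (acc ++ [cur], []) := by
          by_cases hcur : cur = [] <;> simp [pvStepA, hl, hcur]
        simp only [List.foldl_cons, this, List.filter_cons, if_pos (by simp [hl] : decide (p.2 ≠ "comment") = true)]
        rw [ih (acc ++ [cur]) []]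
        simp only [List.map_cons, hl, pvSplitLC_cons_lc]
        rw [pvConsPre_nil_eq _ (pvSplitLC_ne_nil _)]
        simp only [pvConsPre, List.append_nil]
        rw [pvTrim_cons _ _ (pvSplitLC_ne_nil _)]
        simp
      · have : pvStepA (acc, cur) p.2 = (acc, cur ++ [p.2]) := by
          simp [pvStepA, hl, hc]
        simp only [List.foldl_cons, this, List.filter_cons, if_pos (by simp [hc] : decide (p.2 ≠ "comment") = true)]
        rw [ih acc (cur ++ [p.2])]
        simp only [List.map_cons, pvSplitLC_cons_ne p.2 _ hl, pvConsPre_consPre]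

-- B's final step computes pvTrim on any nonempty group list
lemma pv_final (gs : List (List String)) (h : gs ≠ []) :
    (if PySem.List.pyGet? gs (-1) ≠ some [] then gs else PySem.List.slice gs none (some (-1)))
    = pvTrim gs := by
  induction gs with
  | nil => exact absurd rfl h
  | cons g gs ih =>
    rw [PySem.List.pyGet?_neg_one, PySem.List.slice_to_neg_one]
    cases gs with
    | nil =>
      by_cases hg : g = [] <;> simp [pvTrim, hg]
    | cons g' gs' =>
      rw [pvTrim_cons _ _ (by simp)]
      rw [← ih (by simp)]
      rw [PySem.List.pyGet?_neg_one, PySem.List.slice_to_neg_one]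
      have hget : (g :: g' :: gs').getLast? = (g' :: gs').getLast? := by
        simp [List.getLast?_cons_cons]
      rw [hget]
      by_cases hlast : (g' :: gs').getLast? = some [] <;> simp [hlast]

-- ===== VERDICT (by name: the statement is the Claim_ definition above) =====
theorem separateTokens_spec : Claim_equal_separateTokens := by
  intro lines _
  unfold Spec_separateTokens separateTokens separateTokens_alt
  rw [pv_final _ (pvSplitLC_ne_nil _)]
  have := pv_loop lines [] []
  simp only at this
  rw [this]
  rw [pvConsPre_nil_eq _ (pvSplitLC_ne_nil _)]
  simp
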